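-- pv_equiv track=rewrite | github.com/daniel-reich/ubiquitous-fiesta | GGAKNYFg2JEwxzcqk_7.py | anti_divisors
-- ===== SOURCE A (Python) =====
-- def anti_divisors(n):
--   res = []
--   for i in range(1, n):
--     if n % i != 0:
--       if i % 2 != 0:
--         if ((n * 2) + 1) % i == 0 or ((n * 2) - 1) % i == 0:
--           res.append(i)
--       else:
--         if (n * 2) % i == 0:
--           res.append(i)
--   return res
-- ===== SOURCE B (Python) =====
-- def anti_divisors(n):
--     # Collect all divisors of 2n-1, 2n, 2n+1 by trial division up to sqrt,
--     # then keep exactly the anti-divisors and sort them.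
--     cand = set()
--     for m in (2 * n - 1, 2 * n, 2 * n + 1):
--         d = 1
--         while d * d <= m:
--             if m % d == 0:
--                 cand.add(d)
--                 cand.add(m // d)
--             d += 1
--
--     def ok(i):
--         if not (1 <= i < n) or n % i == 0:
--             return False
--         if i % 2 != 0:
--             return (2 * n + 1) % i == 0 or (2 * n - 1) % i == 0
--         return (2 * n) % i == 0
--
--     return sorted(x for x in cand if ok(x))
-- ===== Notes on version B (the rewrite author's own statement) =====
-- stated objective: faster
-- what changed: Instead of scanning every i in range(1,n), B enumerates the divisors of 2n-1, 2n and 2n+1 by trial division up to their square roots (every anti-divisor divides one of these), filters the candidates with the anti-divisor condition and sorts them.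
import Mathlib
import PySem

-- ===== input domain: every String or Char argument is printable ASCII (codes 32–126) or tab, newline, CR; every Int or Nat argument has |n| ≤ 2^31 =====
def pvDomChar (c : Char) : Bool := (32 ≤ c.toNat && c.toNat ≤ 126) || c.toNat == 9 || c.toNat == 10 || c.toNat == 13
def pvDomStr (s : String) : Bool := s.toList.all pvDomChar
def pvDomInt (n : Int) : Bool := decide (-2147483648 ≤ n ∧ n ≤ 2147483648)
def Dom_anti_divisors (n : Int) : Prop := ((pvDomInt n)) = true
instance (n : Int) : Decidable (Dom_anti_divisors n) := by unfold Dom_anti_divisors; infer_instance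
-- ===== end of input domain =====

-- B replaces A's linear scan over range(1, n) by collecting the divisors of 2n-1, 2n, 2n+1
-- via trial division up to their square roots, filtering and sorting (objective: faster).


-- ===== PORT A =====
def anti_divisors (n : Int) : List Int :=
  (PySem.List.pyRange 1 n 1).foldl (fun res i =>
    if PySem.Int.mod n i ≠ 0 then
      if PySem.Int.mod i 2 ≠ 0 then
        if PySem.Int.mod (n * 2 + 1) i = 0 ∨ PySem.Int.mod (n * 2 - 1) i = 0 then
          res ++ [i]
        else res
      else
        if PySem.Int.mod (n * 2) i = 0 then res ++ [i] else res
    else res) []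

-- ===== PORT B =====
-- the inner `while d * d <= m:` loop of Source B
def pvDivLoop (m d : Int) (cand : PySem.Set Int) : PySem.Set Int :=
  if h : d * d ≤ m then
    pvDivLoop m (d + 1)
      (if PySem.Int.mod m d = 0 then
        PySem.Set.add (PySem.Set.add cand d) (PySem.Int.floordiv m d)
      else cand)
  else cand
termination_by (m + 1 - d).toNat
decreasing_by
  rcases le_or_gt d 0 with hd | hd
  · have h0 : (0:Int) ≤ d * d := mul_self_nonneg d
    omega
  · have h0 : d ≤ d * d := le_mul_of_one_le_left (by omega) (by omega)
    omega

-- the local predicate `ok` of Source B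
def pvOk (n i : Int) : Bool :=
  if ¬ (1 ≤ i ∧ i < n) ∨ PySem.Int.mod n i = 0 then false
  else if PySem.Int.mod i 2 ≠ 0 then
    decide (PySem.Int.mod (2 * n + 1) i = 0 ∨ PySem.Int.mod (2 * n - 1) i = 0)
  else decide (PySem.Int.mod (2 * n) i = 0)

def anti_divisors_alt (n : Int) : List Int :=
  let cand :=
    pvDivLoop (2 * n + 1) 1
      (pvDivLoop (2 * n) 1 (pvDivLoop (2 * n - 1) 1 PySem.Set.empty))
  PySem.List.sorted (cand.filter (fun x => pvOk n x)) (fun x => x) false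

-- ===== PRECONDITION & SPEC =====
def Spec_anti_divisors (n : Int) (out : List Int) : Prop := out = anti_divisors_alt n
instance (n : Int) (out : List Int) : Decidable (Spec_anti_divisors n out) := by unfold Spec_anti_divisors; infer_instance

-- ===== CLAIM (what is proved, stated in full; the proofs are below) =====
def Claim_equal_anti_divisors : Prop := ∀ (n : Int), Dom_anti_divisors n → Spec_anti_divisors n (anti_divisors n)

-- ===== LEMMAS AND PROOFS =====

-- A's inner condition (without the range bounds that range(1, n) guarantees)
def pvCond (n i : Int) : Bool :=
  if PySem.Int.mod n i ≠ 0 then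
    if PySem.Int.mod i 2 ≠ 0 then
      decide (PySem.Int.mod (n * 2 + 1) i = 0 ∨ PySem.Int.mod (n * 2 - 1) i = 0)
    else decide (PySem.Int.mod (n * 2) i = 0)
  else false

lemma anti_divisors_eq_filter (n : Int) :
    anti_divisors n = (PySem.List.pyRange 1 n 1).filter (pvCond n) := by
  unfold anti_divisors
  have hbody : (fun (res : List Int) (i : Int) =>
      if PySem.Int.mod n i ≠ 0 then
        if PySem.Int.mod i 2 ≠ 0 then
          if PySem.Int.mod (n * 2 + 1) i = 0 ∨ PySem.Int.mod (n * 2 - 1) i = 0 then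
            res ++ [i]
          else res
        else
          if PySem.Int.mod (n * 2) i = 0 then res ++ [i] else res
      else res)
      = fun (res : List Int) (i : Int) => if pvCond n i then res ++ [i] else res := by
    funext res i
    unfold pvCond
    split_ifs <;> simp_all
  rw [hbody, PySem.List.foldl_append_if_eq_filter]
  simp

lemma pvOk_iff (n i : Int) :
    pvOk n i = true ↔ (1 ≤ i ∧ i < n) ∧ pvCond n i = true := by
  unfold pvOk pvCond
  rw [show (2 * n + 1 : Int) = n * 2 + 1 by ring, show (2 * n - 1 : Int) = n * 2 - 1 by ring,
      show (2 * n : Int) = n * 2 by ring]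
  by_cases hb : (1 ≤ i ∧ i < n) <;> by_cases hm : PySem.Int.mod n i = 0 <;>
    by_cases ho : PySem.Int.mod i 2 ≠ 0 <;> simp_all

lemma pvDivLoop_mono (m d : Int) (acc : PySem.Set Int) :
    ∀ x ∈ acc, x ∈ pvDivLoop m d acc := by
  induction d, acc using pvDivLoop.induct m with
  | case1 d cand h ih =>
      intro x hx
      rw [pvDivLoop, dif_pos h]
      apply ih
      split
      · simp only [PySem.Set.mem_add]; tauto
      · exact hx
  | case2 d cand h =>
      intro x hx
      rw [pvDivLoop, dif_neg h]
      exact hx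

lemma pvDivLoop_nodup (m d : Int) (acc : PySem.Set Int) :
    acc.Nodup → (pvDivLoop m d acc).Nodup := by
  induction d, acc using pvDivLoop.induct m with
  | case1 d cand h ih =>
      intro hn
      rw [pvDivLoop, dif_pos h]
      apply ih
      split
      · exact PySem.Set.nodup_add _ _ (PySem.Set.nodup_add _ _ hn)
      · exact hn
  | case2 d cand h =>
      intro hn
      rw [pvDivLoop, dif_neg h]
      exact hn

lemma pvDivLoop_hit (m e d : Int) (acc : PySem.Set Int)
    (he : 1 ≤ e) (hee : e * e ≤ m) (hdvd : PySem.Int.mod m e = 0)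
    (h1 : 1 ≤ d) (h2 : d ≤ e) :
    e ∈ pvDivLoop m d acc ∧ PySem.Int.floordiv m e ∈ pvDivLoop m d acc := by
  rw [pvDivLoop, dif_pos (by nlinarith : d * d ≤ m)]
  rcases eq_or_lt_of_le h2 with heq | hlt
  · subst heq
    rw [if_pos hdvd]
    constructor <;> apply pvDivLoop_mono <;> simp [PySem.Set.mem_add]
  · exact pvDivLoop_hit m e (d + 1) _ he hee hdvd (by omega) (by omega)
termination_by (e - d).toNat

lemma pvDivLoop_complete (m x j : Int) (acc : PySem.Set Int)
    (hx : 1 ≤ x) (hj : 1 ≤ j) (hm : x * j = m) :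
    x ∈ pvDivLoop m 1 acc := by
  rcases le_or_gt x j with h | h
  · have hee : x * x ≤ m := by nlinarith
    have hdvd : PySem.Int.mod m x = 0 := by
      rw [PySem.Int.mod_eq_zero_iff_dvd]; exact ⟨j, hm.symm⟩
    exact (pvDivLoop_hit m x 1 acc hx hee hdvd le_rfl hx).1
  · have hee : j * j ≤ m := by nlinarith
    have hdvd : PySem.Int.mod m j = 0 := by
      rw [PySem.Int.mod_eq_zero_iff_dvd]; exact ⟨x, by rw [← hm]; ring⟩
    have hfd : PySem.Int.floordiv m j = x := by
      rw [PySem.Int.floordiv_eq_ediv_of_pos (by omega), ← hm, mul_comm,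
          Int.mul_ediv_cancel_left _ (by omega : j ≠ 0)]
    have h2 := (pvDivLoop_hit m j 1 acc (by omega) hee hdvd le_rfl hj).2
    rwa [hfd] at h2

-- the candidate set of Source B
def pvCand (n : Int) : PySem.Set Int :=
  pvDivLoop (2 * n + 1) 1
    (pvDivLoop (2 * n) 1 (pvDivLoop (2 * n - 1) 1 PySem.Set.empty))

lemma pvOk_facts (n x : Int) (hok : pvOk n x = true) : 2 ≤ x ∧ 3 ≤ n := by
  unfold pvOk at hok
  by_cases hb : ¬ (1 ≤ x ∧ x < n) ∨ PySem.Int.mod n x = 0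
  · rw [if_pos hb] at hok; exact absurd hok (by simp)
  · push Not at hb
    obtain ⟨⟨hx1, hxn⟩, hnd⟩ := hb
    have hx2 : 2 ≤ x := by
      by_contra hc
      have hx1' : x = 1 := by omega
      rw [hx1', PySem.Int.mod_eq_emod_of_pos (by omega)] at hnd
      simp at hnd
    exact ⟨hx2, by omega⟩

lemma pvCand_complete (n x : Int) (hok : pvOk n x = true) : x ∈ pvCand n := by
  obtain ⟨hx2, hn3⟩ := pvOk_facts n x hok
  unfold pvOk at hok
  by_cases hb : ¬ (1 ≤ x ∧ x < n) ∨ PySem.Int.mod n x = 0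
  · rw [if_pos hb] at hok; exact absurd hok (by simp)
  · rw [if_neg hb] at hok
    push Not at hb
    obtain ⟨⟨hx1, hxn⟩, hnd⟩ := hb
    unfold pvCand
    by_cases ho : PySem.Int.mod x 2 ≠ 0
    · rw [if_pos ho] at hok
      simp only [decide_eq_true_eq] at hok
      rcases hok with h | h
      · rw [PySem.Int.mod_eq_zero_iff_dvd] at h
        obtain ⟨j, hj⟩ := h
        have hj1 : 1 ≤ j := by nlinarith
        exact pvDivLoop_complete _ x j _ (by omega) hj1 hj.symm
      · rw [PySem.Int.mod_eq_zero_iff_dvd] at h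
        obtain ⟨j, hj⟩ := h
        have hj1 : 1 ≤ j := by nlinarith
        apply pvDivLoop_mono
        apply pvDivLoop_mono
        exact pvDivLoop_complete _ x j _ (by omega) hj1 hj.symm
    · rw [if_neg ho] at hok
      simp only [decide_eq_true_eq] at hok
      rw [PySem.Int.mod_eq_zero_iff_dvd] at hok
      obtain ⟨j, hj⟩ := hok
      have hj1 : 1 ≤ j := by nlinarith
      apply pvDivLoop_mono
      exact pvDivLoop_complete _ x j _ (by omega) hj1 hj.symm

-- ===== VERDICT (by name: the statement is the Claim_ definition above) =====
theorem anti_divisors_spec : Claim_equal_anti_divisors := by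
  intro n _
  unfold Spec_anti_divisors
  rw [anti_divisors_eq_filter]
  show _ = PySem.List.sorted ((pvCand n).filter (fun x => pvOk n x)) (fun x => x) false
  symm
  apply PySem.List.sorted_eq_of_perm_of_pairwise_lt
  · apply (List.perm_ext_iff_of_nodup ?_ ?_).mpr
    · intro a
      simp only [List.mem_filter, PySem.List.mem_pyRange_one]
      constructor
      · rintro ⟨⟨ha1, ha2⟩, hc⟩
        have hok : pvOk n a = true := (pvOk_iff n a).mpr ⟨⟨ha1, ha2⟩, hc⟩
        exact ⟨pvCand_complete n a hok, hok⟩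
      · rintro ⟨-, hok⟩
        obtain ⟨hb, hc⟩ := (pvOk_iff n a).mp hok
        exact ⟨hb, hc⟩
    · exact (PySem.List.nodup_pyRange_one 1 n).filter _
    · exact (pvDivLoop_nodup _ _ _ (pvDivLoop_nodup _ _ _ (pvDivLoop_nodup _ _ _ List.nodup_nil))).filter _
  · exact (PySem.List.pairwise_lt_pyRange_one 1 n).filter _
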